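-- pv_equiv track=rewrite | github.com/instancer-kirik/Compyutinator-Code | DEV/utils.py | extract_diff_blocks
-- ===== SOURCE A (Python) =====
-- def extract_diff_blocks(text):
--     diff_blocks = []
--     lines = text.split('\n')
--     current_block = []
--
--     for line in lines:
--         if line.startswith(('+ ', '- ')):
--             current_block.append(line)
--         elif current_block:
--             diff_blocks.append(current_block)
--             current_block = []
--
--     if current_block:
--         diff_blocks.append(current_block)
--
--     return diff_blocks
-- ===== SOURCE B (Python) =====
-- def extract_diff_blocks(text):
--     lines = text.split('\n')
--     n = len(lines)
--     diff = [line.startswith(('+ ', '- ')) for line in lines]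
--     starts = [i for i in range(n) if diff[i] and (i == 0 or not diff[i - 1])]
--     ends = [i + 1 for i in range(n) if diff[i] and (i + 1 == n or not diff[i + 1])]
--     return [lines[s:e] for s, e in zip(starts, ends)]
-- ===== Notes on version B (the rewrite author's own statement) =====
-- stated objective: alternative
-- what changed: Replaces the stateful accumulator scan with a staged boundary computation: build a boolean mask of diff lines, derive block start indices and end indices from mask transitions, then slice the line list at each (start, end) pair.
import Mathlib
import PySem

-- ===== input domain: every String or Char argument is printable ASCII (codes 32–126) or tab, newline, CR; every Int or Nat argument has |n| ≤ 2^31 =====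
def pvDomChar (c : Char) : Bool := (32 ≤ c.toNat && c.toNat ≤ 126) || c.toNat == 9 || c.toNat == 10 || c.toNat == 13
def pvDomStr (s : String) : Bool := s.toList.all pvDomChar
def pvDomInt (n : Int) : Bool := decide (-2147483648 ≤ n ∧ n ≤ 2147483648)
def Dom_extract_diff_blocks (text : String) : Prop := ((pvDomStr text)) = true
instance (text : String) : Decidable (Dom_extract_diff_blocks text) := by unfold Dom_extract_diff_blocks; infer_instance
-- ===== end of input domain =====

-- B replaces A's stateful accumulator scan with a staged boundary computation: a boolean
-- mask of diff lines, block start/end indices read off mask transitions, and slices of the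
-- line list at each (start, end) pair (alternative algorithm, same cost).

-- line.startswith(('+ ', '- '))
def pvIsDiff (line : String) : Bool :=
  PySem.Str.startswith line "+ " || PySem.Str.startswith line "- "

-- ===== PORT A =====
-- the loop body of A: (diff_blocks, current_block) updated per line
def pvStepA (st : List (List String) × List String) (line : String) :
    List (List String) × List String :=
  if pvIsDiff line then (st.1, st.2 ++ [line])
  else if st.2 ≠ [] then (st.1 ++ [st.2], [])
  else st

def extract_diff_blocks (text : String) : List (List String) :=
  let lines := (PySem.Str.split? text "\n").getD []
  let st := lines.foldl pvStepA ([], [])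
  if st.2 ≠ [] then st.1 ++ [st.2] else st.1

-- ===== PORT B =====
-- mask transitions → boundary indices → slices; pyGetD diff (i-1)/(i+1) is only reached
-- where Python reads diff[i-1]/diff[i+1] (Lean's || short-circuits like Python's or)
def extract_diff_blocks_alt (text : String) : List (List String) :=
  let lines := (PySem.Str.split? text "\n").getD []
  let n : Int := lines.length
  let diff := lines.map pvIsDiff
  let starts := (PySem.List.pyRange 0 n 1).filter
    (fun i => PySem.List.pyGetD diff i false && (i == 0 || !(PySem.List.pyGetD diff (i - 1) false)))
  let ends := ((PySem.List.pyRange 0 n 1).filter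
    (fun i => PySem.List.pyGetD diff i false && (i + 1 == n || !(PySem.List.pyGetD diff (i + 1) false)))).map (· + 1)
  (starts.zip ends).map (fun p => PySem.List.slice lines (some p.1) (some p.2))

-- ===== PRECONDITION & SPEC =====
def Spec_extract_diff_blocks (text : String) (out : List (List String)) : Prop := out = extract_diff_blocks_alt text
instance (text : String) (out : List (List String)) : Decidable (Spec_extract_diff_blocks text out) := by unfold Spec_extract_diff_blocks; infer_instance

-- ===== CLAIM (what is proved, stated in full; the proofs are below) =====
def Claim_equal_extract_diff_blocks : Prop := ∀ (text : String), Dom_extract_diff_blocks text → Spec_extract_diff_blocks text (extract_diff_blocks text)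

-- ===== LEMMAS AND PROOFS =====

-- pvG cur ls: A's remaining result with pending block cur
def pvG (cur : List String) : List String → List (List String)
  | [] => if cur = [] then [] else [cur]
  | l :: ls =>
    if pvIsDiff l then pvG (cur ++ [l]) ls
    else if cur = [] then pvG [] ls else cur :: pvG [] ls

theorem pvFoldA_eq (ls : List String) :
    ∀ (blocks : List (List String)) (cur : List String),
    (let st := ls.foldl pvStepA (blocks, cur)
     if st.2 ≠ [] then st.1 ++ [st.2] else st.1) = blocks ++ pvG cur ls := by
  induction ls with
  | nil =>
    intro blocks cur
    simp only [List.foldl_nil, pvG]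
    by_cases h : cur = [] <;> simp [h]
  | cons l ls ih =>
    intro blocks cur
    simp only [List.foldl_cons, pvStepA, pvG]
    by_cases hd : pvIsDiff l
    · simp [hd, ih]
    · by_cases hc : cur = []
      · simp [hd, hc, ih]
      · simp [hd, hc, ih, List.append_assoc]

theorem pvG_absorb_true (g : List String) :
    ∀ (cur : List String) (rest : List String),
    (∀ x ∈ g, pvIsDiff x = true) → pvG cur (g ++ rest) = pvG (cur ++ g) rest := by
  induction g with
  | nil => simp
  | cons a g ih =>
    intro cur rest h
    have ha : pvIsDiff a = true := h a (by simp)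
    simp only [List.cons_append, pvG, ha, if_pos]
    rw [ih (cur ++ [a]) rest (fun x hx => h x (by simp [hx]))]
    simp

-- B's start indices, at the Nat level
def pvStartsN (m : List Bool) : List Nat :=
  (List.range m.length).filter
    (fun j => m.getD j false && (j == 0 || !(m.getD (j - 1) false)))

-- B's end indices (already +1), at the Nat level
def pvEndsN (m : List Bool) : List Nat :=
  ((List.range m.length).filter
    (fun j => m.getD j false && !(m.getD (j + 1) false))).map (· + 1)

-- recursive characterisation of pvStartsN, with the mask value before the list
def pvSAux (prev : Bool) : List Bool → List Nat
  | [] => []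
  | b :: m => (if b && !prev then [0] else []) ++ (pvSAux b m).map (· + 1)

-- recursive characterisation of pvEndsN
def pvEAux : List Bool → List Nat
  | [] => []
  | b :: m => (if b && !(m.getD 0 false) then [1] else []) ++ (pvEAux m).map (· + 1)

theorem pvStartsN_eq_aux (m : List Bool) : ∀ prev : Bool,
    (List.range m.length).filter
      (fun j => m.getD j false && (if j = 0 then !prev else !(m.getD (j - 1) false)))
      = pvSAux prev m := by
  induction m with
  | nil => intro prev; simp [pvSAux]
  | cons b m ih =>
    intro prev
    simp only [List.length_cons, List.range_succ_eq_map, List.filter_cons, List.filter_map,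
      pvSAux]
    have hc : ∀ j : Nat,
        ((fun j => (b :: m).getD j false && (if j = 0 then !prev else !((b :: m).getD (j - 1) false))) ∘ Nat.succ) j
        = (fun j => m.getD j false && (if j = 0 then !b else !(m.getD (j - 1) false))) j := by
      intro j
      cases j <;> simp
    rw [List.filter_congr (fun j _ => hc j), ih b]
    cases b <;> cases prev <;> simp

theorem pvStartsN_eq (m : List Bool) : pvStartsN m = pvSAux false m := by
  rw [← pvStartsN_eq_aux m false]
  unfold pvStartsN
  apply List.filter_congr
  intro j _
  cases j <;> simp

theorem pvEndsN_eq (m : List Bool) : pvEndsN m = pvEAux m := by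
  induction m with
  | nil => simp [pvEndsN, pvEAux]
  | cons b m ih =>
    simp only [pvEndsN, List.length_cons, List.range_succ_eq_map, List.filter_cons,
      List.filter_map, pvEAux]
    have hc : ∀ j : Nat,
        ((fun j => (b :: m).getD j false && !((b :: m).getD (j + 1) false)) ∘ Nat.succ) j
        = (fun j => m.getD j false && !(m.getD (j + 1) false)) j := by
      intro j; simp
    rw [List.filter_congr (fun j _ => hc j)]
    rw [← ih]
    by_cases hb : b = true <;> by_cases hm : m.getD 0 false = false <;>
      simp_all [pvEndsN, Function.comp]

theorem pvSAux_true_false_head (m : List Bool) (h : m.getD 0 false = false) :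
    pvSAux true m = pvSAux false m := by
  cases m with
  | nil => rfl
  | cons b m => simp_all [pvSAux]

theorem pvSAux_true_run (g : List Bool) :
    ∀ mrest : List Bool, (∀ x ∈ g, x = true) →
    pvSAux true (g ++ mrest) = (pvSAux true mrest).map (· + g.length) := by
  induction g with
  | nil => intro mrest _; simp
  | cons b g ih =>
    intro mrest h
    have hb : b = true := h b (by simp)
    simp only [List.cons_append, pvSAux, hb]
    rw [ih mrest (fun x hx => h x (by simp [hx]))]
    simp [List.map_map]

theorem pvEAux_run (g : List Bool) :
    ∀ mrest : List Bool, (∀ x ∈ g, x = true) → g ≠ [] → mrest.getD 0 false = false →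
    pvEAux (g ++ mrest) = g.length :: (pvEAux mrest).map (· + g.length) := by
  induction g with
  | nil => intro _ _ hne _; exact absurd rfl hne
  | cons b g ih =>
    intro mrest h _ h0
    have hb : b = true := h b (by simp)
    cases g with
    | nil =>
      simp only [List.getD] at h0
      simp [pvEAux, hb, h0]
    | cons c g' =>
      have hc : c = true := h c (by simp)
      have hrec := ih mrest (fun x hx => h x (by simp [hx])) (by simp) h0
      simp only [List.cons_append] at hrec ⊢
      conv_lhs => rw [pvEAux]
      rw [hrec]
      simp [hc, hb, List.map_map]

-- B at the Nat level
def pvBN (ls : List String) : List (List String) :=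
  ((pvSAux false (ls.map pvIsDiff)).zip (pvEAux (ls.map pvIsDiff))).map
    (fun p => (ls.drop p.1).take (p.2 - p.1))

theorem pvBN_eq_G (n : ℕ) : ∀ ls : List String, ls.length ≤ n → pvBN ls = pvG [] ls := by
  induction n with
  | zero =>
    intro ls h
    have : ls = [] := List.eq_nil_of_length_eq_zero (Nat.le_zero.mp h)
    simp [this, pvBN, pvSAux, pvEAux, pvG]
  | succ n ih =>
    intro ls h
    match ls with
    | [] => simp [pvBN, pvSAux, pvEAux, pvG]
    | l :: ls' =>
      have hlen : ls'.length ≤ n := Nat.lt_succ_iff.mp (by simpa using h)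
      by_cases hd : pvIsDiff l
      · -- head is a diff line: peel the whole leading run
        set g := ls'.takeWhile pvIsDiff with hg
        set rest := ls'.dropWhile pvIsDiff with hrest
        have hsplit : ls' = g ++ rest := (List.takeWhile_append_dropWhile).symm
        have hgtrue : ∀ x ∈ g, pvIsDiff x = true := by
          intro x hx; rw [hg] at hx; exact List.mem_takeWhile_imp hx
        have hmg : ∀ b ∈ g.map pvIsDiff, b = true := by
          intro b hb
          obtain ⟨x, hx, rfl⟩ := List.mem_map.mp hb
          exact hgtrue x hx
        have hrhead : (rest.map pvIsDiff).getD 0 false = false := by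
          have h2 := List.head?_dropWhile_not pvIsDiff ls'
          rw [← hrest] at h2
          match hr : rest with
          | [] => rfl
          | r :: rs =>
            simp at h2
            simp [h2]
        have hrestlen : rest.length ≤ n := by
          have h1 : rest.length ≤ ls'.length := List.length_dropWhile_le _ _
          omega
        -- the boundary index lists
        have hS : pvSAux false ((l :: ls').map pvIsDiff)
            = 0 :: ((pvSAux false (rest.map pvIsDiff)).map (· + g.length)).map (· + 1) := by
          rw [hsplit]
          simp only [List.map_cons, List.map_append, pvSAux, hd]
          rw [pvSAux_true_run (g.map pvIsDiff) (rest.map pvIsDiff) hmg,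
              pvSAux_true_false_head _ hrhead]
          simp
        have hE : pvEAux ((l :: ls').map pvIsDiff)
            = (g.length + 1) :: (pvEAux (rest.map pvIsDiff)).map (· + (g.length + 1)) := by
          rw [hsplit]
          simp only [List.map_cons, List.map_append]
          rw [show (pvIsDiff l :: (g.map pvIsDiff ++ rest.map pvIsDiff))
                = (pvIsDiff l :: g.map pvIsDiff) ++ rest.map pvIsDiff by simp]
          rw [pvEAux_run (pvIsDiff l :: g.map pvIsDiff) (rest.map pvIsDiff)
                (by intro x hx; rcases List.mem_cons.mp hx with h1 | h1
                    · rw [h1, hd]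
                    · exact hmg x h1)
                (by simp) hrhead]
          simp
        have hB : pvBN (l :: ls') = (l :: g) :: pvBN rest := by
          unfold pvBN
          rw [hS, hE]
          simp only [List.map_map, List.zip_cons_cons, List.zip_map, List.map_cons]
          refine List.cons_eq_cons.mpr ⟨?_, ?_⟩
          · -- the first block is l :: g
            rw [hsplit]
            simp
          · -- the remaining blocks are those of rest, shifted past l :: g
            rw [hsplit]
            apply List.map_congr_left
            intro p _
            simp only [Function.comp, Prod.map]
            rw [show (l :: (g ++ rest)) = (l :: g) ++ rest by simp]
            rw [show p.1 + g.length + 1 = (l :: g).length + p.1 by simp only [List.length_cons]; omega]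
            rw [List.drop_length_add_append]
            congr 1
            simp only [List.length_cons]
            omega
        rw [hB, ih rest hrestlen]
        -- the A-side recursion takes the same step
        have hGside : pvG [] (l :: ls') = pvG (l :: g) rest := by
          simp only [pvG, hd, if_pos, List.nil_append, hsplit]
          exact pvG_absorb_true g [l] rest hgtrue
        rw [hGside]
        match hr : rest with
        | [] => simp [pvG]
        | r :: rs =>
          have hrfalse : pvIsDiff r = false := by
            simpa using hrhead
          simp [pvG, hrfalse]
      · -- head is not a diff line: drop it on both sides
        have hB : pvBN (l :: ls') = pvBN ls' := by
          have hdf : pvIsDiff l = false := by simpa using hd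
          unfold pvBN
          simp only [List.map_cons, pvSAux, pvEAux, hdf, Bool.false_and, Bool.not_false,
            Bool.false_eq_true, if_false, List.nil_append]
          rw [List.zip_map, List.map_map]
          apply List.map_congr_left
          intro p _
          simp only [Function.comp, Prod.map, List.drop_succ_cons]
          congr 1
          omega
        rw [hB, ih ls' hlen]
        simp [pvG, hd]

-- B's Int-level index computation is the Nat-level one
theorem pvB_eq_BN' (ls : List String) :
    (let n : Int := ls.length
     let diff := ls.map pvIsDiff
     let starts := (PySem.List.pyRange 0 n 1).filter
       (fun i => PySem.List.pyGetD diff i false && (i == 0 || !(PySem.List.pyGetD diff (i - 1) false)))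
     let ends := ((PySem.List.pyRange 0 n 1).filter
       (fun i => PySem.List.pyGetD diff i false && (i + 1 == n || !(PySem.List.pyGetD diff (i + 1) false)))).map (· + 1)
     (starts.zip ends).map (fun p => PySem.List.slice ls (some p.1) (some p.2)))
    = ((pvStartsN (ls.map pvIsDiff)).zip (pvEndsN (ls.map pvIsDiff))).map
        (fun p => (ls.drop p.1).take (p.2 - p.1)) := by
  set m := ls.map pvIsDiff with hm
  have hlen : m.length = ls.length := by simp [hm]
  have hrange : PySem.List.pyRange 0 (ls.length : Int) 1
      = (List.range m.length).map (fun (j : Nat) => (j : Int)) := by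
    rw [hlen]; exact PySem.List.pyRange_zero_nat ls.length
  simp only [hrange, List.filter_map]
  have hcondS : ∀ j : Nat,
      ((fun i => PySem.List.pyGetD m i false
          && (i == 0 || !(PySem.List.pyGetD m (i - 1) false))) ∘ (fun (j : Nat) => (j : Int))) j
      = (fun j => m.getD j false && (j == 0 || !(m.getD (j - 1) false))) j := by
    intro j
    cases j with
    | zero =>
      simp only [Function.comp, Nat.cast_zero]
      simp [PySem.List.pyGetD_zero, List.getD]
    | succ k =>
      simp only [Function.comp]
      rw [show ((k + 1 : Nat) : Int) - 1 = (k : Int) by push_cast; ring]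
      rw [PySem.List.pyGetD_natCast, PySem.List.pyGetD_natCast]
      have h0 : (((k + 1 : Nat) : Int) == 0) = false := by
        rw [beq_eq_false_iff_ne]; push_cast; omega
      rw [h0]
      simp [List.getD]
  have hcondE : ∀ j : Nat,
      ((fun i => PySem.List.pyGetD m i false
          && (i + 1 == (ls.length : Int) || !(PySem.List.pyGetD m (i + 1) false))) ∘ (fun (j : Nat) => (j : Int))) j
      = (fun j => m.getD j false && !(m.getD (j + 1) false)) j := by
    intro j
    simp only [Function.comp]
    rw [show ((j : Int) + 1) = ((j + 1 : Nat) : Int) by push_cast; ring]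
    rw [PySem.List.pyGetD_natCast, PySem.List.pyGetD_natCast]
    by_cases hj : j + 1 = ls.length
    · rw [hj]
      have h1 : m[ls.length]? = none := List.getElem?_eq_none (by omega)
      simp [h1, List.getD]
    · have h2 : (((j + 1 : Nat) : Int) == (ls.length : Int)) = false := by
        rw [beq_eq_false_iff_ne]; push_cast; omega
      rw [h2]
      simp [List.getD]
  rw [List.filter_congr (fun j _ => hcondS j), List.filter_congr (fun j _ => hcondE j)]
  rw [List.map_map]
  rw [show ((fun i : Int => i + 1) ∘ fun (j : Nat) => (j : Int)) = (fun (j : Nat) => (j : Int)) ∘ (fun j : Nat => j + 1) by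
        funext j; simp]
  rw [← List.map_map]
  simp only [pvStartsN, pvEndsN]
  rw [List.zip_map, List.map_map]
  apply List.map_congr_left
  intro p _
  simp only [Function.comp, Prod.map]
  exact PySem.List.slice_natCast ls p.1 p.2

-- B's whole body equals A's loop characterisation
theorem pvB_eq_G (ls : List String) :
    (let n : Int := ls.length
     let diff := ls.map pvIsDiff
     let starts := (PySem.List.pyRange 0 n 1).filter
       (fun i => PySem.List.pyGetD diff i false && (i == 0 || !(PySem.List.pyGetD diff (i - 1) false)))
     let ends := ((PySem.List.pyRange 0 n 1).filter
       (fun i => PySem.List.pyGetD diff i false && (i + 1 == n || !(PySem.List.pyGetD diff (i + 1) false)))).map (· + 1)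
     (starts.zip ends).map (fun p => PySem.List.slice ls (some p.1) (some p.2)))
    = pvG [] ls := by
  rw [pvB_eq_BN' ls, pvStartsN_eq, pvEndsN_eq]
  exact pvBN_eq_G ls.length ls le_rfl

-- ===== VERDICT (by name: the statement is the Claim_ definition above) =====
theorem extract_diff_blocks_spec : Claim_equal_extract_diff_blocks := by
  intro text _
  unfold Spec_extract_diff_blocks extract_diff_blocks extract_diff_blocks_alt
  rw [pvB_eq_G ((PySem.Str.split? text "\n").getD [])]
  simpa using pvFoldA_eq ((PySem.Str.split? text "\n").getD []) [] []
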